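-- pv_equiv track=rewrite | github.com/edisonly1/GenerativeTopologicalSymphonies | src/inference/generate.py | _derive_phrase_ids
-- ===== SOURCE A (Python) =====
-- PHRASE_FLAG_START_VALUES = {1, 3}
--
-- def _derive_phrase_ids(phrase_flags: list[int]) -> list[int]:
--     """Infer phrase ids from a generated phrase-flag stream."""
--     phrase_ids: list[int] = []
--     current_phrase = 0
--     for index, phrase_flag in enumerate(phrase_flags):
--         if index > 0 and phrase_flag in PHRASE_FLAG_START_VALUES:
--             current_phrase += 1
--         phrase_ids.append(current_phrase)
--     return phrase_ids
-- ===== SOURCE B (Python) =====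
-- PHRASE_FLAG_START_VALUES = {1, 3}
--
-- def _derive_phrase_ids(phrase_flags: list[int]) -> list[int]:
--     """Infer phrase ids from a generated phrase-flag stream."""
--     starts = [i for i, f in enumerate(phrase_flags)
--               if i > 0 and f in PHRASE_FLAG_START_VALUES]
--     phrase_ids: list[int] = []
--     prev = 0
--     for k, b in enumerate(starts):
--         phrase_ids.extend([k] * (b - prev))
--         prev = b
--     phrase_ids.extend([len(starts)] * (len(phrase_flags) - prev))
--     return phrase_ids
-- ===== Notes on version B (the rewrite author's own statement) =====
-- stated objective: alternative
-- what changed: A keeps a running phrase counter while sweeping the flags once; B first collects the boundary positions (indices > 0 whose flag is a start value) and then emits each phrase id as a run whose length is the distance between consecutive boundaries.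
import Mathlib
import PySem

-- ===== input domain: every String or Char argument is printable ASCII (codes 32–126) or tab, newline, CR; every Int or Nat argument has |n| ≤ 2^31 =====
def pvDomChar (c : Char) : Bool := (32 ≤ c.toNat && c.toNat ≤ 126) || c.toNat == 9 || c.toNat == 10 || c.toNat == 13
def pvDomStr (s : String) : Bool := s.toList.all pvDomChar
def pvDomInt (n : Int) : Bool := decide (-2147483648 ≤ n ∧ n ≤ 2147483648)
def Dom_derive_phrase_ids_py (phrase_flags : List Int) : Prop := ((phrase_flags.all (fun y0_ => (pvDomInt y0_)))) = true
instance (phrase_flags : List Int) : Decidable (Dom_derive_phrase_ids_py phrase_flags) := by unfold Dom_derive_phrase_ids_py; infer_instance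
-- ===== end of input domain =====

-- B replaces A's single accumulating sweep by a boundary-finding pass followed by
-- run-length expansion of the segments between boundaries (objective: alternative).

-- ===== PORT A =====
-- loop body of A's for-loop over enumerate(phrase_flags), state (phrase_ids, current_phrase)
def pvAStep (st : List Int × Int) (ip : Int × Int) : List Int × Int :=
  let cur := if ip.1 > 0 ∧ (ip.2 = 1 ∨ ip.2 = 3) then st.2 + 1 else st.2
  (st.1 ++ [cur], cur)

def derive_phrase_ids_py (phrase_flags : List Int) : List Int :=
  ((PySem.List.enumerate phrase_flags).foldl pvAStep ([], 0)).1

-- ===== PORT B =====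
-- loop body of B's for-loop over enumerate(starts), state (phrase_ids, prev)
def pvBStep (st : List Int × Int) (kb : Int × Int) : List Int × Int :=
  (st.1 ++ List.replicate (kb.2 - st.2).toNat kb.1, kb.2)

def derive_phrase_ids_py_alt (phrase_flags : List Int) : List Int :=
  let starts := ((PySem.List.enumerate phrase_flags).filter
      (fun p => decide (p.1 > 0) && (p.2 == 1 || p.2 == 3))).map (·.1)
  let st := (PySem.List.enumerate starts).foldl pvBStep ([], 0)
  st.1 ++ List.replicate (((phrase_flags.length : Int)) - st.2).toNat (starts.length : Int)

-- ===== PRECONDITION & SPEC =====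
def Spec_derive_phrase_ids_py (phrase_flags : List Int) (out : List Int) : Prop := out = derive_phrase_ids_py_alt phrase_flags
instance (phrase_flags : List Int) (out : List Int) : Decidable (Spec_derive_phrase_ids_py phrase_flags out) := by unfold Spec_derive_phrase_ids_py; infer_instance

-- ===== CLAIM (what is proved, stated in full; the proofs are below) =====
def Claim_equal_derive_phrase_ids_py : Prop := ∀ (phrase_flags : List Int), Dom_derive_phrase_ids_py phrase_flags → Spec_derive_phrase_ids_py phrase_flags (derive_phrase_ids_py phrase_flags)

-- ===== LEMMAS AND PROOFS =====

def pvIsStart (f : Int) : Bool := f == 1 || f == 3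

-- reference: ids for flags at positions ≥ 1, running counter k
def pvCore (k : Int) : List Int → List Int
  | [] => []
  | f :: rest =>
    let k' := if pvIsStart f then k + 1 else k
    k' :: pvCore k' rest

-- start positions of the flag list placed at positions p, p+1, …
def pvPos (p : Int) : List Int → List Int
  | [] => []
  | f :: rest => if pvIsStart f then p :: pvPos (p + 1) rest else pvPos (p + 1) rest

-- run-length expansion of segments between boundaries
def pvExpand : List Int → Int → Int → Int → List Int
  | [], prev, k, n => List.replicate (n - prev).toNat k
  | b :: bs, prev, k, n => List.replicate (b - prev).toNat k ++ pvExpand bs b (k + 1) n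

theorem pvA_fold_acc (l : List (Int × Int)) (acc : List Int) (cur : Int) :
    l.foldl pvAStep (acc, cur)
      = (acc ++ (l.foldl pvAStep ([], cur)).1, (l.foldl pvAStep ([], cur)).2) := by
  induction l generalizing acc cur with
  | nil => simp
  | cons ip t ih =>
    simp only [List.foldl_cons]
    rw [show pvAStep (acc, cur) ip
        = (acc ++ (pvAStep ([], cur) ip).1, (pvAStep ([], cur) ip).2) by
      simp [pvAStep]]
    rw [ih (acc ++ (pvAStep ([], cur) ip).1)]
    rw [ih (pvAStep ([], cur) ip).1 (pvAStep ([], cur) ip).2]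
    cases h : pvAStep ([], cur) ip
    simp [List.append_assoc]

theorem pvA_fold_core (xs : List Int) (p cur : Int) (hp : 1 ≤ p) :
    ((PySem.List.enumerate xs p).foldl pvAStep ([], cur)).1 = pvCore cur xs := by
  induction xs generalizing p cur with
  | nil => simp [PySem.List.enumerate_nil, pvCore]
  | cons x t ih =>
    rw [PySem.List.enumerate_cons]
    simp only [List.foldl_cons]
    have hstep : pvAStep ([], cur) (p, x)
        = ([if pvIsStart x then cur + 1 else cur], if pvIsStart x then cur + 1 else cur) := by
      simp only [pvAStep, pvIsStart]
      have hp0 : p > 0 := by omega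
      by_cases h13 : x = 1 ∨ x = 3
      · simp [hp0, h13]
      · simp [hp0, h13]
    rw [hstep, pvA_fold_acc]
    rw [ih (p + 1) _ (by omega)]
    simp [pvCore]

theorem pvA_eq (fl : List Int) :
    derive_phrase_ids_py fl = match fl with
      | [] => []
      | _ :: xs => 0 :: pvCore 0 xs := by
  cases fl with
  | nil => simp [derive_phrase_ids_py, PySem.List.enumerate_nil]
  | cons x xs =>
    simp only [derive_phrase_ids_py]
    rw [PySem.List.enumerate_cons]
    simp only [List.foldl_cons]
    have hstep : pvAStep ([], 0) (0, x) = ([(0 : Int)], 0) := by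
      simp [pvAStep]
    rw [hstep, pvA_fold_acc, pvA_fold_core xs (0 + 1) 0 (by omega)]
    simp

theorem pvStarts_eq (xs : List Int) (p : Int) (hp : 1 ≤ p) :
    (((PySem.List.enumerate xs p).filter
        (fun q => decide (q.1 > 0) && (q.2 == 1 || q.2 == 3))).map (·.1)) = pvPos p xs := by
  induction xs generalizing p with
  | nil => simp [PySem.List.enumerate_nil, pvPos]
  | cons x t ih =>
    rw [PySem.List.enumerate_cons, List.filter_cons]
    have hp0 : decide (p > 0) = true := by simp; omega
    rw [hp0]
    simp only [Bool.true_and]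
    by_cases hs : pvIsStart x = true
    · have hb : ((x == 1 || x == 3) : Bool) = true := hs
      rw [hb, if_pos rfl, List.map_cons, ih (p + 1) (by omega)]
      simp [pvPos, hs]
    · have hb : ((x == 1 || x == 3) : Bool) = false := by
        simpa [pvIsStart] using hs
      rw [hb]
      simp only [Bool.false_eq_true, if_false]
      rw [ih (p + 1) (by omega)]
      simp [pvPos, hs]

theorem pvPos_ge (xs : List Int) (p i : Int) (h : i ∈ pvPos p xs) : p ≤ i := by
  induction xs generalizing p with
  | nil => simp [pvPos] at h
  | cons x t ih =>
    simp only [pvPos] at h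
    by_cases hs : pvIsStart x = true
    · rw [if_pos hs] at h
      rcases List.mem_cons.mp h with rfl | h'
      · omega
      · have := ih (p + 1) h'; omega
    · rw [if_neg hs] at h
      have := ih (p + 1) h; omega

theorem pvExpand_shift (bs : List Int) (p k n : Int)
    (hbs : ∀ i ∈ bs, p + 1 ≤ i) (hn : p + 1 ≤ n) :
    pvExpand bs p k n = k :: pvExpand bs (p + 1) k n := by
  cases bs with
  | nil =>
    simp only [pvExpand]
    rw [show (n - p).toNat = (n - (p + 1)).toNat + 1 by omega]
    simp [List.replicate_succ]
  | cons b t =>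
    simp only [pvExpand]
    have hb : p + 1 ≤ b := hbs b (List.mem_cons_self ..)
    rw [show (b - p).toNat = (b - (p + 1)).toNat + 1 by omega]
    simp [List.replicate_succ]

theorem pvExpand_core (xs : List Int) (p k : Int) :
    pvExpand (pvPos p xs) p k (p + (xs.length : Int)) = pvCore k xs := by
  induction xs generalizing p k with
  | nil => simp [pvPos, pvExpand, pvCore]
  | cons x t ih =>
    have hlen : p + ((x :: t).length : Int) = (p + 1) + (t.length : Int) := by
      simp; omega
    rw [hlen]
    have hge : ∀ i ∈ pvPos (p + 1) t, p + 1 ≤ i := fun i h => pvPos_ge t (p + 1) i h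
    have hn : p + 1 ≤ (p + 1) + (t.length : Int) := by
      have : (0 : Int) ≤ (t.length : Int) := Int.natCast_nonneg _
      omega
    by_cases hs : pvIsStart x = true
    · simp only [pvPos, if_pos hs, pvExpand]
      rw [show (p - p).toNat = 0 by omega]
      simp only [List.replicate_zero, List.nil_append]
      rw [pvExpand_shift _ p (k + 1) _ hge hn, ih (p + 1) (k + 1)]
      simp [pvCore, hs]
    · simp only [pvPos, if_neg hs]
      rw [pvExpand_shift _ p k _ hge hn, ih (p + 1) k]
      simp [pvCore, hs]

theorem pvB_fold (bs : List Int) (k : Int) (acc : List Int) (prev n : Int) :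
    ((PySem.List.enumerate bs k).foldl pvBStep (acc, prev)).1
      ++ List.replicate (n - ((PySem.List.enumerate bs k).foldl pvBStep (acc, prev)).2).toNat
          (k + (bs.length : Int))
      = acc ++ pvExpand bs prev k n := by
  induction bs generalizing k acc prev with
  | nil => simp [PySem.List.enumerate_nil, pvExpand]
  | cons b t ih =>
    rw [PySem.List.enumerate_cons]
    simp only [List.foldl_cons, pvBStep]
    have hk : k + ((b :: t).length : Int) = (k + 1) + (t.length : Int) := by
      simp; omega
    rw [hk, ih (k + 1) (acc ++ List.replicate (b - prev).toNat k) b]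
    simp [pvExpand, List.append_assoc]

theorem pvB_eq (fl : List Int) :
    derive_phrase_ids_py_alt fl = match fl with
      | [] => []
      | _ :: xs => 0 :: pvCore 0 xs := by
  cases fl with
  | nil =>
    simp [derive_phrase_ids_py_alt, PySem.List.enumerate_nil]
  | cons x xs =>
    simp only [derive_phrase_ids_py_alt]
    rw [PySem.List.enumerate_cons]
    have h0 : (decide ((0 : Int) > 0) && ((x == 1 || x == 3))) = false := by simp
    rw [List.filter_cons_of_neg (by simpa using h0)]
    rw [pvStarts_eq xs (0 + 1) (by omega)]
    rw [show (0 : Int) + 1 = 1 by decide]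
    have hfold := pvB_fold (pvPos 1 xs) 0 [] 0 ((x :: xs).length : Int)
    simp only [List.nil_append] at hfold
    rw [show ((0 : Int) + ((pvPos 1 xs).length : Int)) = ((pvPos 1 xs).length : Int) by omega]
      at hfold
    rw [hfold]
    have hge : ∀ i ∈ pvPos 1 xs, (0 : Int) + 1 ≤ i := by
      intro i h; have := pvPos_ge xs 1 i h; omega
    have hn : (0 : Int) + 1 ≤ ((x :: xs).length : Int) := by simp
    rw [show ((x :: xs).length : Int) = (0 : Int) + ((x :: xs).length : Int) by omega]
    rw [pvExpand_shift _ 0 0 _ hge (by simpa using hn)]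
    rw [show (0 : Int) + 1 = 1 by omega,
        show (0 : Int) + ((x :: xs).length : Int) = 1 + (xs.length : Int) by simp; omega]
    rw [pvExpand_core xs 1 0]

-- ===== VERDICT (by name: the statement is the Claim_ definition above) =====
theorem derive_phrase_ids_py_spec : Claim_equal_derive_phrase_ids_py := by
  intro fl _
  show derive_phrase_ids_py fl = derive_phrase_ids_py_alt fl
  rw [pvA_eq, pvB_eq]
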